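-- pv_equiv track=rewrite | github.com/wzygxr/shuati | class040_MeetInMiddleAndBidirectionalBFS/Code02_SnacksWaysBuyTickets.py | compute
-- ===== SOURCE A (Python) =====
-- from typing import List
--
-- def f(arr: List[int], start: int, end: int, s: int, w: int, ans: List[int], j: int) -> int:
--     """
--     递归计算数组指定范围内所有可能的和
--
--     Args:
--         arr: 输入数组
--         start: 起始索引
--         end: 结束索引
--         s: 当前累积和
--         w: 背包容量上限
--         ans: 存储结果的数组
--         j: 当前在结果数组中的位置
--
--     Returns:
--         结果数组的新位置
--     """
--     # 剪枝：如果当前和已经超过背包容量，直接返回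
--     if s > w:
--         return j
--
--     if start == end:
--         # 到达边界，将当前和加入结果数组
--         ans[j] = s
--         return j + 1
--     else:
--         # 不要arr[start]位置的数
--         j = f(arr, start + 1, end, s, w, ans, j)
--         # 要arr[start]位置的数
--         j = f(arr, start + 1, end, s + arr[start], w, ans, j)
--         return j
--
-- def compute(arr: List[int], n: int, w: int) -> int:
--     """
--     计算满足条件的零食放法数量
--     使用折半搜索算法，将数组分为两部分分别处理
--
--     Args:
--         arr: 零食体积数组
--         n: 零食数量
--         w: 背包容量
--
--     Returns:
--         满足条件的方案数
--     """
--     # 初始化结果数组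
--     MAXM = 1 << 20
--     lsum = [0] * MAXM
--     rsum = [0] * MAXM
--
--     # 分别计算前半部分和后半部分的所有可能和
--     lsize = f(arr, 0, n // 2, 0, w, lsum, 0)
--     rsize = f(arr, n // 2, n, 0, w, rsum, 0)
--
--     # 对两个数组进行排序，为双指针合并做准备
--     lsum[:lsize] = sorted(lsum[:lsize])
--     rsum[:rsize] = sorted(rsum[:rsize])
--
--     # 使用双指针技术计算满足条件的组合数
--     ans = 0
--     j = 0
--     for i in range(lsize - 1, -1, -1):
--         # 移动右指针，找到所有满足条件的组合
--         while j < rsize and lsum[i] + rsum[j] <= w: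
--             j += 1
--         # 累加满足条件的组合数
--         ans += j
--
--     return ans
-- ===== SOURCE B (Python) =====
-- # B: same meet-in-the-middle count, but the halves' pruned subset sums are built
-- # iteratively level-by-level (instead of A's recursive writer into a big buffer),
-- # and the pair count is taken by a per-left-value binary search over the sorted
-- # right sums (instead of A's descending two-pointer sweep).
-- from typing import List
--
-- def compute(arr: List[int], n: int, w: int) -> int:
--     h = n // 2
--
--     def gen(xs):
--         # partial sums surviving the 's > w' prune, level by level
--         cur = [0] if 0 <= w else []
--         for x in xs:
--             cur = [t for s in cur for t in (s, s + x) if t <= w]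
--         return cur
--
--     def bisect_right(a, x):
--         lo, hi = 0, len(a)
--         while lo < hi:
--             mid = (lo + hi) // 2
--             if a[mid] <= x:
--                 lo = mid + 1
--             else:
--                 hi = mid
--         return lo
--
--     rs = sorted(gen(arr[h:n]))
--     ans = 0
--     for l in gen(arr[:h]):
--         ans += bisect_right(rs, w - l)
--     return ans
-- ===== Notes on version B (the rewrite author's own statement) =====
-- stated objective: alternative
-- what changed: The pruned half subset sums are generated iteratively level-by-level (list expansion per element) instead of A's recursive writer into a fixed 2^20 buffer, and pairs are counted by a per-left-value binary search over the sorted right sums instead of A's descending two-pointer sweep over both sorted halves.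
import Mathlib
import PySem

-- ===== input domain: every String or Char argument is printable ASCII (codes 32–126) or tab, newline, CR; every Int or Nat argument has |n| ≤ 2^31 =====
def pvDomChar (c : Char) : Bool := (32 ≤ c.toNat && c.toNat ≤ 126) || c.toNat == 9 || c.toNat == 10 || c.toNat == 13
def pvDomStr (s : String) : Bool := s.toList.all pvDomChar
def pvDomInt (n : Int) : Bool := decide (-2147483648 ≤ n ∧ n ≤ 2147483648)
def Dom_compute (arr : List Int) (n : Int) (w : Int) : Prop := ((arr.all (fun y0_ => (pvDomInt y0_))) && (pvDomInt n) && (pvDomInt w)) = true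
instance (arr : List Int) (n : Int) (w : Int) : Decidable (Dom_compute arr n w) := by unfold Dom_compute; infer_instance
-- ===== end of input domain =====

-- B builds the pruned half subset sums iteratively level-by-level and counts pairs by a
-- per-left-value binary search over the sorted right sums, instead of A's recursive
-- buffer-writer and descending two-pointer sweep (objective: alternative, same cost class).

-- ===== PORT A =====
-- recursion f of A; fuel = end - start (Python recurses on start+1 until start == end);
-- the written prefix ans[0:j] of A's buffer is modelled as the list acc;
-- none = IndexError (arr[start] out of range)
def fAux (arr : List Int) (w : Int) : Nat → Int → Int → Int → List Int → Option (List Int)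
  | fuel, start, fin, s, acc =>
    if s > w then some acc
    else if start = fin then some (acc ++ [s])
    else match fuel with
      | 0 => none
      | Nat.succ fuel' =>
        match fAux arr w fuel' (start + 1) fin s acc with
        | none => none
        | some acc1 =>
          match PySem.List.pyGet? arr start with
          | none => none
          | some x => fAux arr w fuel' (start + 1) fin (s + x) acc1

-- the inner while loop: advance j while j < rsize and lsum[i] + rsum[j] <= w
def advA (w li : Int) (r : List Int) (j : Nat) : Nat :=
  if h : j < r.length ∧ li + r.getD j 0 ≤ w then advA w li r (j + 1) else j
termination_by r.length - j
decreasing_by omega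

-- the outer for loop: i from lsize-1 down to 0, state (ans, j)
def outerA (w : Int) (lsum rsum : List Int) : Nat → Int × Nat → Int × Nat
  | 0, st => st
  | Nat.succ i, st =>
      let j' := advA w (lsum.getD i 0) rsum st.2
      outerA w lsum rsum i (st.1 + (j' : Int), j')

def compute (arr : List Int) (n : Int) (w : Int) : Int :=
  let h := PySem.Int.floordiv n 2
  match fAux arr w h.toNat 0 h 0 [], fAux arr w (n - h).toNat h n 0 [] with
  | some lsum0, some rsum0 =>
      let lsum := PySem.List.sorted lsum0 (fun x => x)
      let rsum := PySem.List.sorted rsum0 (fun x => x)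
      (outerA w lsum rsum lsum.length (0, 0)).1
  | _, _ => 0   -- Python raises here (IndexError / RecursionError); excluded by Pre_compute

-- ===== PORT B =====
-- level-by-level pruned partial sums: cur = [t for s in cur for t in (s, s + x) if t <= w]
def genB (w : Int) (xs : List Int) : List Int :=
  xs.foldl (fun cur x => cur.flatMap (fun s => List.filter (fun t => decide (t ≤ w)) [s, s + x]))
    (if 0 ≤ w then [0] else [])

-- Source B's hand-written bisect_right loop is exactly CPython's bisect.bisect_right
-- = PySem.List.bisectRight
def compute_alt (arr : List Int) (n : Int) (w : Int) : Int :=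
  let h := PySem.Int.floordiv n 2
  let rs := PySem.List.sorted (genB w (PySem.List.slice arr (some h) (some n))) (fun x => x)
  (genB w (PySem.List.slice arr none (some h))).foldl
    (fun ans l => ans + (PySem.List.bisectRight rs (w - l) : Int)) 0

-- ===== PRECONDITION & SPEC =====
-- Pre_ excludes exactly the inputs where Python A raises without debate: with w ≥ 0 the
-- unpruned all-exclude path indexes arr[start] at every position below n, so n > len(arr)
-- raises IndexError and n < 0 recurses endlessly (RecursionError); for w < 0 the root call
-- prunes at once and A returns 0. (For n ≥ 42 A can in addition overflow its fixed 2^20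
-- result buffers and raise IndexError when more than 2^20 pruned partial sums survive in a
-- half; that raise condition is not closed-form over the input and only inputs needing over
-- 2^21 recursive calls reach it, so Pre_ does not attempt to carve it out.)
def Pre_compute (arr : List Int) (n : Int) (w : Int) : Prop :=
  w < 0 ∨ (0 ≤ n ∧ n ≤ (arr.length : Int))
instance (arr : List Int) (n : Int) (w : Int) : Decidable (Pre_compute arr n w) := by
  unfold Pre_compute; infer_instance

def pvWitness_compute : List Int × Int × Int := ([2, -1, 3, 4], 4, 5)

def Spec_compute (arr : List Int) (n : Int) (w : Int) (out : Int) : Prop := out = compute_alt arr n w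
instance (arr : List Int) (n : Int) (w : Int) (out : Int) : Decidable (Spec_compute arr n w out) := by unfold Spec_compute; infer_instance

-- ===== CLAIM (what is proved, stated in full; the proofs are below) =====
def Claim_equal_compute : Prop := ∀ (arr : List Int) (n : Int) (w : Int), Dom_compute arr n w → Pre_compute arr n w → Spec_compute arr n w (compute arr n w)

-- ===== LEMMAS AND PROOFS =====

-- pure DFS generator equal to A's f: leaves of the pruned choice tree, exclude branch first
def gA (w : Int) : List Int → Int → List Int
  | [], s => if s > w then [] else [s]
  | x :: t, s => if s > w then [] else gA w t s ++ gA w t (s + x)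

lemma gA_of_gt (w : Int) (xs : List Int) (s : Int) (h : s > w) : gA w xs s = [] := by
  cases xs <;> simp [gA, h]

-- A's writer recursion appends exactly the DFS leaves of the remaining segment
lemma fAux_eq (arr : List Int) (w : Int) :
    ∀ (d : Nat) (start s : Int) (acc : List Int), 0 ≤ start → start.toNat + d ≤ arr.length →
      fAux arr w d start (start + (d : Int)) s acc
        = some (acc ++ gA w ((arr.drop start.toNat).take d) s) := by
  intro d
  induction d with
  | zero =>
    intro start s acc h0 hlen
    by_cases hs : s > w
    · simp [fAux, gA, hs]
    · simp [fAux, gA, hs]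
  | succ d ih =>
    intro start s acc h0 hlen
    have hne : start ≠ start + ((d + 1 : Nat) : Int) := by push_cast; omega
    have hstep : start + ((d + 1 : Nat) : Int) = (start + 1) + ((d : Nat) : Int) := by
      push_cast; ring
    have hidx : start.toNat < arr.length := by omega
    have hget : PySem.List.pyGet? arr start = some arr[start.toNat] :=
      PySem.List.pyGet?_eq_some_getElem arr h0 (by omega : start < (arr.length : Int))
    have hdrop : arr.drop start.toNat = arr[start.toNat] :: arr.drop (start.toNat + 1) :=
      List.drop_eq_getElem_cons hidx
    have htoNat : (start + 1).toNat = start.toNat + 1 := by omega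
    by_cases hs : s > w
    · rw [fAux]
      simp only [hs, if_true]
      rw [gA_of_gt w _ s hs]
      simp
    · rw [fAux]
      simp only [if_neg hs, hstep, ih (start + 1) s acc (by omega) (by omega), hget]
      rw [ih (start + 1) (s + arr[start.toNat]) _ (by omega) (by omega)]
      rw [if_neg (show ¬ start = start + 1 + (d : Int) by omega)]
      rw [hdrop, List.take_succ_cons]
      simp [gA, hs, htoNat, List.append_assoc]

-- B's level-by-level expansion keeps exactly the prune-surviving partial sums,
-- and its leaf order coincides with the DFS order
lemma genB_fold (w : Int) : ∀ (xs cur : List Int), (∀ s ∈ cur, s ≤ w) →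
    xs.foldl (fun cur x => cur.flatMap (fun s => List.filter (fun t => decide (t ≤ w)) [s, s + x])) cur
      = cur.flatMap (fun s => gA w xs s) := by
  intro xs
  induction xs with
  | nil =>
    intro cur hcur
    simp only [List.foldl_nil]
    refine ((List.flatMap_congr (l := cur) (g := fun s => [s]) ?_).trans (by simp)).symm
    intro s hs
    simp [gA, show ¬ s > w from not_lt.mpr (hcur s hs)]
  | cons x t ih =>
    intro cur hcur
    simp only [List.foldl_cons]
    rw [ih _ ?side]
    case side =>
      intro s hs
      simp only [List.mem_flatMap, List.mem_filter] at hs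
      obtain ⟨a, _, hf⟩ := hs
      simpa using hf.2
    rw [List.flatMap_assoc]
    refine List.flatMap_congr ?_
    intro s hs
    have hsw : ¬ s > w := not_lt.mpr (hcur s hs)
    have hsle : s ≤ w := hcur s hs
    by_cases hx : s + x ≤ w
    · simp [gA, hsw, hsle, hx]
    · simp [gA, hsw, hsle, hx, gA_of_gt w t (s + x) (by omega)]

lemma genB_eq (w : Int) (xs : List Int) : genB w xs = gA w xs 0 := by
  unfold genB
  by_cases hw : 0 ≤ w
  · rw [if_pos hw, genB_fold w xs [0] (by simpa using hw)]
    simp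
  · rw [if_neg hw, genB_fold w xs [] (by simp)]
    simp [gA_of_gt w xs 0 (by omega)]

-- on a sorted list a downward-closed predicate holds exactly on the first countP positions
lemma prefix_iff (p : Int → Bool) (hp : ∀ a b : Int, a ≤ b → p b → p a) :
    ∀ (r : List Int), r.Pairwise (· ≤ ·) → ∀ (k : Nat) (hk : k < r.length),
      (p r[k] ↔ k < r.countP p) := by
  intro r
  induction r with
  | nil => intro _ k hk; simp at hk
  | cons y t ih =>
    intro hpw k hk
    have hpw' := (List.pairwise_cons.mp hpw)
    by_cases hy : p y
    · rw [List.countP_cons_of_pos hy]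
      cases k with
      | zero => simpa using hy
      | succ k =>
        have := ih hpw'.2 k (by simpa using hk)
        simpa [Nat.succ_lt_succ_iff] using this
    · have hall : ∀ z ∈ t, ¬ p z := by
        intro z hz hpz
        exact hy (hp y z (hpw'.1 z hz) hpz)
      have hcnt : (y :: t).countP p = 0 := by
        rw [List.countP_eq_zero]
        intro z hz
        rcases List.mem_cons.mp hz with h | h
        · subst h; exact hy
        · exact hall z h
      rw [hcnt]
      simp only [Nat.not_lt_zero, iff_false]
      cases k with
      | zero => simpa using hy
      | succ k =>
        have hk' : k < t.length := by simpa using hk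
        simpa using hall t[k] (List.getElem_mem hk')

-- a cut position (all-true prefix, all-false suffix) is the countP
lemma countP_of_cut (xs : List Int) (p : Int → Bool) :
    ∀ (c : Nat), c ≤ xs.length → (∀ j (hj : j < xs.length), j < c → p xs[j]) →
      (∀ j (hj : j < xs.length), c ≤ j → ¬ p xs[j]) → xs.countP p = c := by
  induction xs with
  | nil =>
    intro c hc _ _
    have : c = 0 := by simpa using hc
    simp [this]
  | cons y t ih =>
    intro c hc h1 h2
    cases c with
    | zero =>
      rw [List.countP_eq_zero.mpr]
      intro z hz
      rcases List.mem_cons.mp hz with h | h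
      · subst h; exact h2 0 (by simp) (by omega)
      · obtain ⟨j, hj, rfl⟩ := List.getElem_of_mem h
        exact h2 (j + 1) (by simpa using hj) (by omega)
    | succ c =>
      have hy : p y := h1 0 (by simp) (by omega)
      rw [List.countP_cons_of_pos hy,
        ih c (by simpa using hc) (fun j hj hjc => h1 (j + 1) (by simpa using hj) (by omega))
          (fun j hj hjc => h2 (j + 1) (by simpa using hj) (by omega))]

lemma bisectRight_eq_countP (rs : List Int) (x : Int) (hs : rs.Pairwise (· ≤ ·)) :
    PySem.List.bisectRight rs x = rs.countP (fun t => decide (t ≤ x)) := by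
  obtain ⟨hle, h1, h2⟩ := PySem.List.bisectRight_spec rs x hs
  exact (countP_of_cut rs _ _ hle (fun j hj hjc => by simpa using h1 j hj hjc)
    (fun j hj hjc => by simpa using h2 j hj hjc)).symm

-- A's while loop, started at or below the count, stops exactly at the count
lemma advA_eq (w li : ℤ) (r : List Int) (hr : r.Pairwise (· ≤ ·)) :
    ∀ (j : Nat), j ≤ r.countP (fun t => decide (li + t ≤ w)) →
      advA w li r j = r.countP (fun t => decide (li + t ≤ w)) := by
  have hpi := prefix_iff (fun t => decide (li + t ≤ w))
    (by intro a b hab h; simp at h ⊢; omega) r hr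
  set c := r.countP (fun t => decide (li + t ≤ w)) with hc
  have hcl : c ≤ r.length := List.countP_le_length
  intro j
  induction hj : (r.length - j) generalizing j with
  | zero =>
    intro hjc
    have hj' : j = c := by omega
    rw [advA, dif_neg]
    · exact hj'
    · omega
  | succ m ih =>
    intro hjc
    rcases Nat.lt_or_ge j c with hlt | hge
    · have hjlen : j < r.length := by omega
      have hpj : li + r[j] ≤ w := by simpa using (hpi j hjlen).mpr hlt
      rw [advA, dif_pos ⟨hjlen, by rwa [List.getD_eq_getElem r 0 hjlen]⟩]
      exact ih (j + 1) (by omega) hlt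
    · have hj' : j = c := by omega
      rw [advA, dif_neg]
      · exact hj'
      · rintro ⟨hjlen, hle⟩
        rw [List.getD_eq_getElem r 0 hjlen] at hle
        have := (hpi j hjlen).mp (by simpa using hle)
        omega

-- the outer two-pointer sweep accumulates the per-left-value counts
lemma outer_eq (w : Int) (L R : List Int) (hL : L.Pairwise (· ≤ ·)) (hR : R.Pairwise (· ≤ ·)) :
    ∀ (k : Nat) (a : Int) (j : Nat), k ≤ L.length →
      (∀ m, m < k → j ≤ R.countP (fun t => decide (L.getD m 0 + t ≤ w))) →
      (outerA w L R k (a, j)).1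
        = a + ((L.take k).map (fun l => (R.countP (fun t => decide (l + t ≤ w)) : Int))).sum := by
  intro k
  induction k with
  | zero => intro a j _ _; simp [outerA]
  | succ k ih =>
    intro a j hk hj
    have hkl : k < L.length := by omega
    have hadv : advA w (L.getD k 0) R j = R.countP (fun t => decide (L.getD k 0 + t ≤ w)) :=
      advA_eq w (L.getD k 0) R hR j (hj k (by omega))
    rw [outerA]
    simp only [hadv]
    rw [ih _ _ (by omega) ?mono]
    case mono =>
      intro m hm
      refine List.countP_mono_left ?_
      intro t _ hle
      have hLm : L.getD m 0 ≤ L.getD k 0 := by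
        rw [List.getD_eq_getElem L 0 (by omega), List.getD_eq_getElem L 0 hkl]
        exact List.pairwise_iff_getElem.mp hL m k (by omega) hkl (by omega)
      simp only [decide_eq_true_eq] at hle ⊢
      omega
    have htake : List.take (k + 1) L = List.take k L ++ [L[k]] := by
      rw [List.take_add_one, List.getElem?_eq_getElem hkl]
      simp
    rw [htake, List.map_append, List.sum_append]
    simp only [List.getD_eq_getElem L 0 hkl, List.map_cons, List.map_nil, List.sum_cons,
      List.sum_nil]
    ring

-- ===== VERDICT (by name: the statement is the Claim_ definition above) =====
theorem compute_spec : Claim_equal_compute := by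
  intro arr n w _ hpre
  unfold Spec_compute
  rcases hpre with hw | ⟨hn0, hnlen⟩
  · -- w < 0 : everything prunes at the root, both sides return 0
    have hz : (0 : Int) > w := by omega
    have h1 : ∀ fuel start fin acc, fAux arr w fuel start fin 0 acc = some acc := by
      intro fuel start fin acc
      cases fuel <;> (rw [fAux]; simp [hz])
    have hB : ∀ xs, genB w xs = [] := by
      intro xs
      rw [genB_eq, gA_of_gt w xs 0 hz]
    unfold compute compute_alt
    simp [h1, hB, outerA, PySem.List.sorted]
  · -- 0 ≤ n ≤ len(arr)
    have h2 : PySem.Int.floordiv n 2 = n / 2 := PySem.Int.floordiv_eq_ediv_of_pos (by omega)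
    set h := PySem.Int.floordiv n 2 with hh
    have hh0 : 0 ≤ h := by omega
    have hhn : h ≤ n := by omega
    have e1 : fAux arr w h.toNat 0 h 0 [] = some (gA w (arr.take h.toNat) 0) := by
      have H := fAux_eq arr w h.toNat 0 0 [] le_rfl (by simp; omega)
      rw [show (0 : Int) + (h.toNat : Int) = h by omega] at H
      simpa using H
    have e2 : fAux arr w (n - h).toNat h n 0 []
        = some (gA w ((arr.drop h.toNat).take (n - h).toNat) 0) := by
      have H := fAux_eq arr w (n - h).toNat h 0 [] hh0 (by omega)
      rw [show h + (((n - h).toNat : Nat) : Int) = n by omega] at H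
      simpa using H
    set L0 := gA w (arr.take h.toNat) 0 with hL0
    set R0 := gA w ((arr.drop h.toNat).take (n - h).toNat) 0 with hR0
    set Ls := PySem.List.sorted L0 (fun x => x) with hLs
    set Rs := PySem.List.sorted R0 (fun x => x) with hRs
    have hLp : Ls.Pairwise (· ≤ ·) := PySem.List.sorted_pairwise L0 (fun x => x)
    have hRp : Rs.Pairwise (· ≤ ·) := PySem.List.sorted_pairwise R0 (fun x => x)
    have hA : compute arr n w
        = (Ls.map (fun l => (Rs.countP (fun t => decide (l + t ≤ w)) : Int))).sum := by
      unfold compute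
      have := outer_eq w Ls Rs hLp hRp Ls.length 0 0 le_rfl (by intro m _; exact Nat.zero_le _)
      simp only [← hh, e1, e2, ← hLs, ← hRs]
      simpa [List.take_length] using this
    have hsl1 : PySem.List.slice arr none (some h) = arr.take h.toNat :=
      PySem.List.slice_to arr hh0
    have hsl2 : PySem.List.slice arr (some h) (some n)
        = (arr.drop h.toNat).take (n - h).toNat := by
      rw [PySem.List.slice_toNat arr hh0 hn0]
      congr 1
      omega
    have hB : compute_alt arr n w
        = (L0.map (fun l => (Rs.countP (fun t => decide (l + t ≤ w)) : Int))).sum := by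
      unfold compute_alt
      simp only [← hh, hsl1, hsl2, genB_eq, ← hL0, ← hR0, ← hRs]
      rw [PySem.List.foldl_add L0 (fun l => (PySem.List.bisectRight Rs (w - l) : Int)) 0]
      rw [zero_add]
      congr 1
      refine List.map_congr_left ?_
      intro l _
      rw [bisectRight_eq_countP Rs (w - l) hRp]
      congr 1
      refine List.countP_congr ?_
      intro t _
      simp only [decide_eq_true_eq]
      omega
    rw [hA, hB]
    exact ((PySem.List.sorted_perm L0 (fun x => x) false).map _).sum_eq
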